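-- pv_equiv track=rewrite | github.com/computer-science-with-applications/book | src/data_structures/lists/solutions/combine_triples.py | combine_triples
-- ===== SOURCE A (Python) =====
-- def combine_triples(lst):
--     """
--     Given a list of integer triples (3-tuples), compute a triple, where the ith
--     element in the result is the sum of the ith element in the triples
--     from the input list.
--
--     Args:
--         lst (List[Tuple(int, int, int)]): the list of triples
--
--     Returns Tuple[int, int, int]: a triple where the ith element is the
--       sum of the ith elements from the input triples.
--     """
--     fst_tot = 0
--     snd_tot = 0
--     third_tot = 0
--     for f, s, t in lst:
--         fst_tot += f
--         snd_tot += s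
--         third_tot += t
--     return (fst_tot, snd_tot, third_tot)
-- ===== SOURCE B (Python) =====
-- def combine_triples(lst):
--     if not lst:
--         return (0, 0, 0)
--     return tuple(sum(col) for col in zip(*lst))
-- ===== Notes on version B (the rewrite author's own statement) =====
-- stated objective: idiomatic
-- what changed: Replaces the three running accumulators in a row-wise loop with a transpose (zip(*lst)) reduced column-wise by sum, with an explicit (0,0,0) for the empty list.
import Mathlib
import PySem

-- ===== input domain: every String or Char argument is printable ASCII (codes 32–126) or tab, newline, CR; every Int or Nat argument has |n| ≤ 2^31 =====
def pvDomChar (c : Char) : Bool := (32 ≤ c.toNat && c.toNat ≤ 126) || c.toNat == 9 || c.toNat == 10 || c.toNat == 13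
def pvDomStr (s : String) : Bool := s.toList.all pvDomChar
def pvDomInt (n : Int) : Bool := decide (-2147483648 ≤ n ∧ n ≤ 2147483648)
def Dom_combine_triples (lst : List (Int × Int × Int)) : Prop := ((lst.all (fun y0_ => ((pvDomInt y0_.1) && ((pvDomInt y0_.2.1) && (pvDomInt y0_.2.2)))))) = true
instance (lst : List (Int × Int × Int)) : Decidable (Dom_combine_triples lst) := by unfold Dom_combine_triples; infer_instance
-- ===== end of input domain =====

-- ===== PORT A =====
-- B transposes the list and sums each column instead of A's three row-wise accumulators (idiomatic).
def combine_triples (lst : List (Int × Int × Int)) : Int × Int × Int :=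
  lst.foldl (fun acc x => (acc.1 + x.1, acc.2.1 + x.2.1, acc.2.2 + x.2.2)) (0, 0, 0)

-- ===== PORT B =====
def combine_triples_alt (lst : List (Int × Int × Int)) : Int × Int × Int :=
  if lst = [] then (0, 0, 0)
  else ((lst.map (·.1)).sum, (lst.map (·.2.1)).sum, (lst.map (·.2.2)).sum)

-- ===== PRECONDITION & SPEC =====
def Spec_combine_triples (lst : List (Int × Int × Int)) (out : Int × Int × Int) : Prop := out = combine_triples_alt lst
instance (lst : List (Int × Int × Int)) (out : Int × Int × Int) : Decidable (Spec_combine_triples lst out) := by unfold Spec_combine_triples; infer_instance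

-- ===== CLAIM (what is proved, stated in full; the proofs are below) =====
def Claim_equal_combine_triples : Prop := ∀ (lst : List (Int × Int × Int)), Dom_combine_triples lst → Spec_combine_triples lst (combine_triples lst)

-- ===== LEMMAS AND PROOFS =====

-- ===== VERDICT (by name: the statement is the Claim_ definition above) =====
theorem foldl_sum_triple (lst : List (Int × Int × Int)) (a b c : Int) :
    lst.foldl (fun acc x => (acc.1 + x.1, acc.2.1 + x.2.1, acc.2.2 + x.2.2)) (a, b, c)
      = (a + (lst.map (·.1)).sum, b + (lst.map (·.2.1)).sum, c + (lst.map (·.2.2)).sum) := by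
  induction lst generalizing a b c with
  | nil => simp
  | cons h t ih => simp [List.foldl, ih, add_assoc]

theorem combine_triples_spec : Claim_equal_combine_triples := by
  intro lst _
  unfold Spec_combine_triples combine_triples combine_triples_alt
  rw [foldl_sum_triple]
  split_ifs with h <;> simp [h]
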